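-- pv_equiv track=rewrite | github.com/rohanshrma222/Graph-Based-Data-Modeling-and-Query-System | backend/database/init_db.py | _delivery_to_order_lookup
-- ===== SOURCE A (Python) =====
-- from typing import Any, Iterable
--
-- def _normalize_text(value: Any) -> str | None:
--     if value is None:
--         return None
--     text = str(value).strip()
--     return text or None
--
-- def _normalize_item_number(value: Any) -> str | None:
--     text = _normalize_text(value)
--     if text is None:
--         return None
--     stripped = text.lstrip("0")
--     return stripped or "0"
--
-- def _delivery_to_order_lookup(raw: dict[str, list[dict[str, Any]]]) -> tuple[dict[str, str], dict[tuple[str, str], str], dict[str, str]]: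
--     delivery_to_order: dict[str, str] = {}
--     delivery_item_to_order: dict[tuple[str, str], str] = {}
--     delivery_to_plant: dict[str, str] = {}
--     for row in raw["outbound_delivery_items"]:
--         delivery_id = _normalize_text(row.get("deliveryDocument"))
--         order_id = _normalize_text(row.get("referenceSdDocument"))
--         item_no = _normalize_item_number(row.get("deliveryDocumentItem"))
--         plant_id = _normalize_text(row.get("plant"))
--         if delivery_id and order_id and delivery_id not in delivery_to_order:
--             delivery_to_order[delivery_id] = order_id
--         if delivery_id and order_id and item_no is not None:
--             delivery_item_to_order[(delivery_id, item_no)] = order_id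
--         if delivery_id and plant_id and delivery_id not in delivery_to_plant:
--             delivery_to_plant[delivery_id] = plant_id
--     return delivery_to_order, delivery_item_to_order, delivery_to_plant
-- ===== SOURCE B (Python) =====
-- from typing import Any
--
--
-- def _normalize_text(value: Any) -> str | None:
--     if value is None:
--         return None
--     text = str(value).strip()
--     return text or None
--
--
-- def _normalize_item_number(value: Any) -> str | None:
--     text = _normalize_text(value)
--     if text is None:
--         return None
--     stripped = text.lstrip("0")
--     return stripped or "0"
--
--
-- def _delivery_to_order_lookup(raw: dict) -> tuple:
--     rows = raw["outbound_delivery_items"]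
--
--     # Pass 1: delivery -> order, first valid pair wins.
--     delivery_to_order: dict = {}
--     for row in rows:
--         delivery_id = _normalize_text(row.get("deliveryDocument"))
--         order_id = _normalize_text(row.get("referenceSdDocument"))
--         if delivery_id and order_id and delivery_id not in delivery_to_order:
--             delivery_to_order[delivery_id] = order_id
--
--     # Pass 2: (delivery, item) -> order, every valid row assigns (last wins).
--     delivery_item_to_order: dict = {}
--     for row in rows:
--         delivery_id = _normalize_text(row.get("deliveryDocument"))
--         order_id = _normalize_text(row.get("referenceSdDocument"))
--         item_no = _normalize_item_number(row.get("deliveryDocumentItem"))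
--         if delivery_id and order_id and item_no is not None:
--             delivery_item_to_order[(delivery_id, item_no)] = order_id
--
--     # Pass 3: delivery -> plant, first valid pair wins.
--     delivery_to_plant: dict = {}
--     for row in rows:
--         delivery_id = _normalize_text(row.get("deliveryDocument"))
--         plant_id = _normalize_text(row.get("plant"))
--         if delivery_id and plant_id and delivery_id not in delivery_to_plant:
--             delivery_to_plant[delivery_id] = plant_id
--
--     return delivery_to_order, delivery_item_to_order, delivery_to_plant
-- ===== Notes on version B (the rewrite author's own statement) =====
-- stated objective: alternative
-- what changed: The single fused loop maintaining three dicts at once is replaced by three independent passes over the rows, each building exactly one dict (first-wins guards and last-wins overwrite preserved).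
import Mathlib
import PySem

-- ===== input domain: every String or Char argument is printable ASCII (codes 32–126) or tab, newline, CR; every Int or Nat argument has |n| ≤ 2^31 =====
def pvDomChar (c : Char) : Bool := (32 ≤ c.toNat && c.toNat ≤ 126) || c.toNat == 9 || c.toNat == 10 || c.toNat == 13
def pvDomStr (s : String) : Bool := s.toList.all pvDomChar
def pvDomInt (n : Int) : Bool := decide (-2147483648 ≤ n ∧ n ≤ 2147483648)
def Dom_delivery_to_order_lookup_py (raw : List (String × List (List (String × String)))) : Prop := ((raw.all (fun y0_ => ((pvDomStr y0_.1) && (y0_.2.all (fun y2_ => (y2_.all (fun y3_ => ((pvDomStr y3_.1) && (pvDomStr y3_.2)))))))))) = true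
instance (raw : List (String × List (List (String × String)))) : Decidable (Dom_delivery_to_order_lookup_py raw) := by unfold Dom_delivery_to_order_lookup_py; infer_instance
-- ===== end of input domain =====

-- B replaces the single fused three-dict loop by three independent single-dict passes over the rows (alternative decomposition, same cost); A raises KeyError when "outbound_delivery_items" is missing, excluded by Pre_.



-- ===== PORT A =====
-- _normalize_text: None stays None; str(value).strip(), empty becomes None.
def pvNormText (value : Option String) : Option String :=
  match value with
  | none => none
  | some v =>
    let text := PySem.Str.strip v
    if text = "" then none else some text

-- _normalize_item_number: text.lstrip("0") ported by hand as dropWhile (= '0')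
-- on the character list (exact: lstrip("0") removes exactly the leading '0's).
def pvNormItem (value : Option String) : Option String :=
  match pvNormText value with
  | none => none
  | some text =>
    let stripped := String.ofList (text.toList.dropWhile (fun c => c = '0'))
    if stripped = "" then some "0" else some stripped

-- one fused loop step over the triple-dict state, as in A
def pvStepA
    (st : PySem.Dict String String × PySem.Dict (String × String) String × PySem.Dict String String)
    (row : List (String × String)) :
    PySem.Dict String String × PySem.Dict (String × String) String × PySem.Dict String String :=
  let r := PySem.Dict.mk row
  let delivery_id := pvNormText (r.get? "deliveryDocument")
  let order_id := pvNormText (r.get? "referenceSdDocument")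
  let item_no := pvNormItem (r.get? "deliveryDocumentItem")
  let plant_id := pvNormText (r.get? "plant")
  let d1 :=
    match delivery_id, order_id with
    | some d, some o => if st.1.contains d then st.1 else st.1.insert d o
    | _, _ => st.1
  let d2 :=
    match delivery_id, order_id, item_no with
    | some d, some o, some i => st.2.1.insert (d, i) o
    | _, _, _ => st.2.1
  let d3 :=
    match delivery_id, plant_id with
    | some d, some p => if st.2.2.contains d then st.2.2 else st.2.2.insert d p
    | _, _ => st.2.2
  (d1, d2, d3)

def delivery_to_order_lookup_py (raw : List (String × List (List (String × String)))) : (List (String × String)) × (List (String × String × String)) × (List (String × String)) :=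
  let rows := (PySem.Dict.mk raw).getD "outbound_delivery_items" []
  let st := rows.foldl pvStepA (PySem.Dict.empty, PySem.Dict.empty, PySem.Dict.empty)
  (st.1.items, st.2.1.items.map (fun p => (p.1.1, p.1.2, p.2)), st.2.2.items)

-- ===== PORT B =====
-- pass 1: delivery -> order, first valid pair wins
def pvPass1 (d : PySem.Dict String String) (row : List (String × String)) : PySem.Dict String String :=
  let r := PySem.Dict.mk row
  match pvNormText (r.get? "deliveryDocument"), pvNormText (r.get? "referenceSdDocument") with
  | some dd, some oo => if d.contains dd then d else d.insert dd oo
  | _, _ => d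

-- pass 2: (delivery, item) -> order, last wins
def pvPass2 (d : PySem.Dict (String × String) String) (row : List (String × String)) : PySem.Dict (String × String) String :=
  let r := PySem.Dict.mk row
  match pvNormText (r.get? "deliveryDocument"), pvNormText (r.get? "referenceSdDocument"),
        pvNormItem (r.get? "deliveryDocumentItem") with
  | some dd, some oo, some ii => d.insert (dd, ii) oo
  | _, _, _ => d

-- pass 3: delivery -> plant, first valid pair wins
def pvPass3 (d : PySem.Dict String String) (row : List (String × String)) : PySem.Dict String String :=
  let r := PySem.Dict.mk row
  match pvNormText (r.get? "deliveryDocument"), pvNormText (r.get? "plant") with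
  | some dd, some pp => if d.contains dd then d else d.insert dd pp
  | _, _ => d

def delivery_to_order_lookup_py_alt (raw : List (String × List (List (String × String)))) : (List (String × String)) × (List (String × String × String)) × (List (String × String)) :=
  let rows := (PySem.Dict.mk raw).getD "outbound_delivery_items" []
  let delivery_to_order := rows.foldl pvPass1 PySem.Dict.empty
  let delivery_item_to_order := rows.foldl pvPass2 PySem.Dict.empty
  let delivery_to_plant := rows.foldl pvPass3 PySem.Dict.empty
  (delivery_to_order.items,
   delivery_item_to_order.items.map (fun p => (p.1.1, p.1.2, p.2)),
   delivery_to_plant.items)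

-- ===== PRECONDITION & SPEC =====
-- A raises KeyError when "outbound_delivery_items" is absent from raw; Pre_ excludes exactly that.
def Pre_delivery_to_order_lookup_py (raw : List (String × List (List (String × String)))) : Prop :=
  (PySem.Dict.mk raw).contains "outbound_delivery_items" = true
instance (raw : List (String × List (List (String × String)))) : Decidable (Pre_delivery_to_order_lookup_py raw) := by unfold Pre_delivery_to_order_lookup_py; infer_instance

def pvWitness_delivery_to_order_lookup_py : (List (String × List (List (String × String)))) :=
  [("outbound_delivery_items", [[("deliveryDocument", "D1"), ("referenceSdDocument", "O1"), ("deliveryDocumentItem", "010"), ("plant", "P1")]])]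

def Spec_delivery_to_order_lookup_py (raw : List (String × List (List (String × String)))) (out : (List (String × String)) × (List (String × String × String)) × (List (String × String))) : Prop := out = delivery_to_order_lookup_py_alt raw
instance (raw : List (String × List (List (String × String)))) (out : (List (String × String)) × (List (String × String × String)) × (List (String × String))) : Decidable (Spec_delivery_to_order_lookup_py raw out) := by unfold Spec_delivery_to_order_lookup_py; infer_instance

-- ===== CLAIM (what is proved, stated in full; the proofs are below) =====
def Claim_equal_delivery_to_order_lookup_py : Prop := ∀ (raw : List (String × List (List (String × String)))), Dom_delivery_to_order_lookup_py raw → Pre_delivery_to_order_lookup_py raw → Spec_delivery_to_order_lookup_py raw (delivery_to_order_lookup_py raw)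

-- ===== LEMMAS AND PROOFS =====

-- the fused fold is componentwise the three pass folds
theorem pvFold_split (rows : List (List (String × String)))
    (d1 : PySem.Dict String String) (d2 : PySem.Dict (String × String) String)
    (d3 : PySem.Dict String String) :
    rows.foldl pvStepA (d1, d2, d3)
      = (rows.foldl pvPass1 d1, rows.foldl pvPass2 d2, rows.foldl pvPass3 d3) := by
  induction rows generalizing d1 d2 d3 with
  | nil => rfl
  | cons row rest ih =>
      simp only [List.foldl_cons]
      rw [show pvStepA (d1, d2, d3) row = (pvPass1 d1 row, pvPass2 d2 row, pvPass3 d3 row) from rfl]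
      exact ih _ _ _

-- ===== VERDICT (by name: the statement is the Claim_ definition above) =====
theorem delivery_to_order_lookup_py_spec : Claim_equal_delivery_to_order_lookup_py := by
  intro raw _ _
  simp only [Spec_delivery_to_order_lookup_py, delivery_to_order_lookup_py,
    delivery_to_order_lookup_py_alt, pvFold_split]
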